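-- pv_equiv track=rewrite | github.com/tinusleroux/crowdbiz_graph | app/services/search_service.py | _apply_organization_filters
-- ===== SOURCE A (Python) =====
-- from typing import Dict, List, Any, Optional, Tuple
--
-- def _apply_organization_filters(orgs: List[Dict], filters: Dict[str, Any]) -> List[Dict]:
--     """Apply organization-specific filters"""
--     filtered_orgs = orgs
--
--     # League filter
--     if filters.get('league'):
--         league = filters['league'].lower()
--         filtered_orgs = [
--             org for org in filtered_orgs
--             if org.get('league', '').lower().find(league) >= 0
--         ]
--
--     # City filter
--     if filters.get('city'):
--         city = filters['city'].lower()
--         filtered_orgs = [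
--             org for org in filtered_orgs
--             if org.get('city', '').lower().find(city) >= 0
--         ]
--
--     # State filter
--     if filters.get('state'):
--         state = filters['state'].lower()
--         filtered_orgs = [
--             org for org in filtered_orgs
--             if org.get('state', '').lower().find(state) >= 0
--         ]
--
--     return filtered_orgs
-- ===== SOURCE B (Python) =====
-- def _apply_organization_filters(orgs, filters):
--     """Apply organization-specific filters (single pass over a precomputed filter list)"""
--     active = [(key, filters[key].lower())
--               for key in ('league', 'city', 'state')
--               if filters.get(key)]
--     return [org for org in orgs
--             if all(org.get(key, '').lower().find(sub) >= 0 for key, sub in active)]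
-- ===== Notes on version B (the rewrite author's own statement) =====
-- stated objective: simpler
-- what changed: Replaces A's three sequential conditional filtering passes with one pass: first collect the active (field, lowered substring) pairs, then a single comprehension keeps each org iff it satisfies all of them.
import Mathlib
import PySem

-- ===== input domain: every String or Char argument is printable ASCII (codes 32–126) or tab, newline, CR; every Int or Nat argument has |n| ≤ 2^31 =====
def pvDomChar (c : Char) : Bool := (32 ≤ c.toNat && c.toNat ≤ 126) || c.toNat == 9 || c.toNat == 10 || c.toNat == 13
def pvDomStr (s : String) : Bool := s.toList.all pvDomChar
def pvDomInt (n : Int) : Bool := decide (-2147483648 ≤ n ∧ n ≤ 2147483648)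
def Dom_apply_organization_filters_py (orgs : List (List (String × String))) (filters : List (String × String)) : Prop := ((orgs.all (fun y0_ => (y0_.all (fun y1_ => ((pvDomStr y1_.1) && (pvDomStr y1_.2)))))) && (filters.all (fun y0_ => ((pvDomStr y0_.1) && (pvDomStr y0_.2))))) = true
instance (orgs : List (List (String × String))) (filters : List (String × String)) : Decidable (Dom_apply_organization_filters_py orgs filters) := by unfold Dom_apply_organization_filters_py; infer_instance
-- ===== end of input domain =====

-- ===== PORT A =====
-- B is a single pass over a precomputed active-filter list instead of A's three sequential passes; equal return values (A may return the same list object when no filter is active, B a fresh equal list).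
-- shared elementary test: org.get(key, '').lower().find(sub) >= 0  (appears verbatim in both Pythons)
def pvKeep (org : List (String × String)) (key : String) (sub : String) : Bool :=
  decide (0 <= PySem.Str.find (PySem.Str.lower (PySem.Dict.getD (PySem.Dict.mk org) key "")) sub)

def apply_organization_filters_py (orgs : List (List (String × String))) (filters : List (String × String)) : List (List (String × String)) :=
  let d := PySem.Dict.mk filters
  let filtered := orgs
  -- League filter
  let filtered := if PySem.Dict.getD d "league" "" != "" then
      let league := PySem.Str.lower (PySem.Dict.getD d "league" "")
      filtered.filter (fun org => pvKeep org "league" league)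
    else filtered
  -- City filter
  let filtered := if PySem.Dict.getD d "city" "" != "" then
      let city := PySem.Str.lower (PySem.Dict.getD d "city" "")
      filtered.filter (fun org => pvKeep org "city" city)
    else filtered
  -- State filter
  let filtered := if PySem.Dict.getD d "state" "" != "" then
      let state := PySem.Str.lower (PySem.Dict.getD d "state" "")
      filtered.filter (fun org => pvKeep org "state" state)
    else filtered
  filtered

-- ===== PORT B =====
def apply_organization_filters_py_alt (orgs : List (List (String × String))) (filters : List (String × String)) : List (List (String × String)) :=
  let d := PySem.Dict.mk filters
  let active := ["league", "city", "state"].filterMap (fun key =>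
      if PySem.Dict.getD d key "" != "" then some (key, PySem.Str.lower (PySem.Dict.getD d key "")) else none)
  orgs.filter (fun org => active.all (fun p => pvKeep org p.1 p.2))

-- ===== PRECONDITION & SPEC =====
def Spec_apply_organization_filters_py (orgs : List (List (String × String))) (filters : List (String × String)) (out : List (List (String × String))) : Prop := out = apply_organization_filters_py_alt orgs filters
instance (orgs : List (List (String × String))) (filters : List (String × String)) (out : List (List (String × String))) : Decidable (Spec_apply_organization_filters_py orgs filters out) := by unfold Spec_apply_organization_filters_py; infer_instance

-- ===== CLAIM (what is proved, stated in full; the proofs are below) =====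
def Claim_equal_apply_organization_filters_py : Prop := ∀ (orgs : List (List (String × String))) (filters : List (String × String)), Dom_apply_organization_filters_py orgs filters → Spec_apply_organization_filters_py orgs filters (apply_organization_filters_py orgs filters)

-- ===== LEMMAS AND PROOFS =====

-- ===== VERDICT (by name: the statement is the Claim_ definition above) =====
theorem apply_organization_filters_py_spec : Claim_equal_apply_organization_filters_py := by
  intro orgs filters _
  unfold Spec_apply_organization_filters_py apply_organization_filters_py apply_organization_filters_py_alt
  simp only [List.filterMap_cons, List.filterMap_nil]
  generalize PySem.Dict.getD (PySem.Dict.mk filters) "league" "" = vl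
  generalize PySem.Dict.getD (PySem.Dict.mk filters) "city" "" = vc
  generalize PySem.Dict.getD (PySem.Dict.mk filters) "state" "" = vs
  split_ifs
  all_goals simp only [List.filter_filter, List.all_cons, List.all_nil, Bool.and_true, List.filter_true]
  all_goals
    apply List.filter_congr
    intro o _
    generalize pvKeep o "league" (PySem.Str.lower vl) = b1
    generalize pvKeep o "city" (PySem.Str.lower vc) = b2
    generalize pvKeep o "state" (PySem.Str.lower vs) = b3
    cases b1 <;> cases b2 <;> cases b3 <;> rfl
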